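-- pv_equiv track=rewrite | github.com/morgoth1145/advent-of-code | 2021/21/solution.py | compute_quantum_moves_to_winning_universes
-- ===== SOURCE A (Python) =====
-- import collections
-- import itertools
--
-- def compute_quantum_moves_to_winning_universes(max_tile, target_score, die):
--     # Precompute the moves for slightly faster runtime
--     QUANTUM_MOVES = collections.Counter(sum(rolls) % max_tile
--                                         for rolls
--                                         in itertools.product(range(1, die+1),
--                                                              repeat=3))
--
--     # Compute the moves to win frequency for all positions
--     moves_to_win = [[None] * max_tile for _ in range(target_score)]
--     for cur_score in range(target_score-1, -1, -1):
--         for tile in range(max_tile):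
--             totals = collections.Counter()
--             for move, universes in QUANTUM_MOVES.items():
--                 new_tile = (tile + move) % max_tile
--                 new_score = cur_score + new_tile + 1
--                 if new_score >= target_score:
--                     totals[1] += universes
--                 else:
--                     next_totals = moves_to_win[new_score][new_tile]
--                     for next_moves, next_universes in next_totals.items():
--                         totals[next_moves+1] += universes * next_universes
--             moves_to_win[cur_score][tile] = totals
--
--     return moves_to_win[0]
-- ===== SOURCE B (Python) =====
-- import collections
-- import itertools
--
-- def compute_quantum_moves_to_winning_universes(max_tile, target_score, die):
--     QUANTUM_MOVES = collections.Counter(sum(rolls) % max_tile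
--                                         for rolls
--                                         in itertools.product(range(1, die+1),
--                                                              repeat=3))
--
--     # Top-down instead of bottom-up: demand-driven memoized evaluation of
--     # dist(cur_score, tile) with an explicit work stack (no preallocated
--     # table, no loops over scores, and no recursion-depth limit).
--     memo = {}
--
--     def dist(cur_score, tile):
--         stack = [(cur_score, tile)]
--         while stack:
--             key = stack[-1]
--             if key in memo:
--                 stack.pop()
--                 continue
--             cs, t = key
--             totals = collections.Counter()
--             ready = True
--             for move, universes in QUANTUM_MOVES.items():
--                 new_tile = (t + move) % max_tile
--                 new_score = cs + new_tile + 1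
--                 if new_score >= target_score:
--                     totals[1] += universes
--                 else:
--                     sub = memo.get((new_score, new_tile))
--                     if sub is None:
--                         ready = False
--                         stack.append((new_score, new_tile))
--                     else:
--                         for next_moves, next_universes in sub.items():
--                             totals[next_moves + 1] += universes * next_universes
--             if ready:
--                 memo[key] = totals
--                 stack.pop()
--         return memo[(cur_score, tile)]
--
--     return [dist(0, tile) for tile in range(max_tile)]
-- ===== Notes on version B (the rewrite author's own statement) =====
-- stated objective: alternative
-- what changed: Replaces A's bottom-up DP (a preallocated [score][tile] table of None rows filled in place by a reversed score loop and a tile loop) with top-down demand-driven memoized evaluation of dist(cur_score, tile): an explicit work stack resolves only the states reachable from score 0, caching each in a memo dict, with the answer read off per starting tile.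
import Mathlib
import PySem

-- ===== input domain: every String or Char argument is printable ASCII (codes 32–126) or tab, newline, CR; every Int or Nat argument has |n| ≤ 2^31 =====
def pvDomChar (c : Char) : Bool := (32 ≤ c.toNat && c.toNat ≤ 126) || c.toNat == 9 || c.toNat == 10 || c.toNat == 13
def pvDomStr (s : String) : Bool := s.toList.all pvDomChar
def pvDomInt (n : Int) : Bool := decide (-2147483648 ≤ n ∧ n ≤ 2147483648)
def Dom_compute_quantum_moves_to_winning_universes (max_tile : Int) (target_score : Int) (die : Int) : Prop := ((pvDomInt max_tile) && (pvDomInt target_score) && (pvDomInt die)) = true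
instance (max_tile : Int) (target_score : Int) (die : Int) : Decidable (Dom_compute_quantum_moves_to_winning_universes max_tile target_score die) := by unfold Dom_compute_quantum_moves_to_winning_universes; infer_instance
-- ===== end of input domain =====

-- B replaces A's bottom-up preallocated [score][tile] table (filled by reversed
-- loops) with a top-down memoized recursion on (cur_score, tile); an alternative
-- decomposition of the same cost. Return-value equivalence only.

-- ===== PORT A =====
-- Shared context helper: the line
--   QUANTUM_MOVES = Counter(sum(rolls) % max_tile for rolls in product(range(1, die+1), repeat=3))
-- is verbatim identical in A and in B, so both ports use this one helper.
def pvQuantumMoves (max_tile die : Int) : PySem.Dict Int Int :=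
  PySem.Dict.counter
    ((PySem.List.pyRange 1 (die + 1) 1).flatMap (fun r1 =>
      (PySem.List.pyRange 1 (die + 1) 1).flatMap (fun r2 =>
        (PySem.List.pyRange 1 (die + 1) 1).map (fun r3 =>
          PySem.Int.mod (r1 + r2 + r3) max_tile))))

def compute_quantum_moves_to_winning_universes (max_tile : Int) (target_score : Int) (die : Int) : List (List (Int × Int)) :=
  let qm := pvQuantumMoves max_tile die
  -- moves_to_win = [[None] * max_tile for _ in range(target_score)]
  let init : List (List (Option (PySem.Dict Int Int))) :=
    List.replicate target_score.toNat (List.replicate max_tile.toNat none)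
  let table :=
    (PySem.List.pyRange (target_score - 1) (-1) (-1)).foldl (fun tbl cur_score =>
      (PySem.List.pyRange 0 max_tile 1).foldl (fun tbl tile =>
        let totals := (PySem.Dict.items qm).foldl (fun totals mu =>
          let new_tile := PySem.Int.mod (tile + mu.1) max_tile
          let new_score := cur_score + new_tile + 1
          if target_score ≤ new_score then
            PySem.Dict.modify totals 1 0 (· + mu.2)
          else
            -- moves_to_win[new_score][new_tile]: the defaults stand for Python's
            -- unreachable IndexError/None paths (the cell is always a filled Counter here)
            let next_totals :=
              (PySem.List.pyGetD (PySem.List.pyGetD tbl new_score []) new_tile none).getD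
                PySem.Dict.empty
            (PySem.Dict.items next_totals).foldl
              (fun totals p => PySem.Dict.modify totals (p.1 + 1) 0 (· + mu.2 * p.2)) totals)
          PySem.Dict.empty
        -- moves_to_win[cur_score][tile] = totals   (both indices are nonnegative here)
        PySem.List.pySetD tbl cur_score
          (PySem.List.pySetD (PySem.List.pyGetD tbl cur_score []) tile (some totals)))
        tbl)
      init
  -- return moves_to_win[0]: IndexError for target_score ≤ 0 (excluded by Pre_)
  (PySem.List.pyGetD table 0 []).map (fun o => (o.getD PySem.Dict.empty).items)

-- ===== PORT B =====
-- One pass of B's inner for-loop over QUANTUM_MOVES for the stack-top key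
-- (cs, t): accumulates (missing children in push order, totals); Python's
-- `ready` flag is `missing = []`.
def altExpand (mt ts : Int) (qm : PySem.Dict Int Int)
    (memo : PySem.Dict (Int × Int) (PySem.Dict Int Int)) (cs t : Int) :
    List (Int × Int) × PySem.Dict Int Int :=
  (PySem.Dict.items qm).foldl (fun st mu =>
    let new_tile := PySem.Int.mod (t + mu.1) mt
    let new_score := cs + new_tile + 1
    if ts ≤ new_score then
      (st.1, PySem.Dict.modify st.2 1 0 (· + mu.2))
    else
      match PySem.Dict.get? memo (new_score, new_tile) with
      | none => (st.1 ++ [(new_score, new_tile)], st.2)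
      | some sub =>
        (st.1, (PySem.Dict.items sub).foldl
          (fun totals p => PySem.Dict.modify totals (p.1 + 1) 0 (· + mu.2 * p.2)) st.2))
    ([], PySem.Dict.empty)

-- B's while-loop (head of the list = top of Python's stack); the fuel is only
-- a termination guard and is chosen large enough to never run out (proved in
-- the lemmas below), so the fuel-0 default is unreachable.
def altLoop (mt ts : Int) (qm : PySem.Dict Int Int) :
    Nat → List (Int × Int) → PySem.Dict (Int × Int) (PySem.Dict Int Int) →
      PySem.Dict (Int × Int) (PySem.Dict Int Int)
  | 0, _, memo => memo
  | fuel + 1, stack, memo =>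
    match stack with
    | [] => memo
    | key :: rest =>
      match PySem.Dict.get? memo key with
      | some _ => altLoop mt ts qm fuel rest memo   -- if key in memo: pop
      | none =>
        let st := altExpand mt ts qm memo key.1 key.2
        if st.1 = [] then   -- ready: memo[key] = totals; pop
          altLoop mt ts qm fuel rest (PySem.Dict.insert memo key st.2)
        else                -- push the missing children
          altLoop mt ts qm fuel (st.1.reverse ++ key :: rest) memo

def compute_quantum_moves_to_winning_universes_alt (max_tile : Int) (target_score : Int) (die : Int) : List (List (Int × Int)) :=
  let qm := pvQuantumMoves max_tile die
  let fuel := (PySem.Dict.size qm + 2) ^ (target_score.toNat + 2)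
  -- [dist(0, tile) for tile in range(max_tile)], the memo surviving across
  -- tiles; memo[(0, tile)] is always present after dist's loop, so the
  -- Dict.empty default stands for Python's unreachable KeyError path
  ((PySem.List.pyRange 0 max_tile 1).foldl (fun st tile =>
      let memo := altLoop max_tile target_score qm fuel [(0, tile)] st.1
      (memo, st.2 ++
        [((PySem.Dict.get? memo (0, tile)).getD PySem.Dict.empty).items]))
    ((PySem.Dict.empty : PySem.Dict (Int × Int) (PySem.Dict Int Int)),
     ([] : List (List (Int × Int))))).2

-- ===== PRECONDITION & SPEC =====
-- Pre_ excludes exactly the inputs on which Python A raises: target_score ≤ 0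
-- (IndexError on moves_to_win[0]) and max_tile = 0 with die ≥ 1 (ZeroDivisionError
-- in sum(rolls) % max_tile).
def Pre_compute_quantum_moves_to_winning_universes (max_tile : Int) (target_score : Int) (die : Int) : Prop :=
  1 ≤ target_score ∧ (max_tile = 0 → die ≤ 0)
instance (max_tile : Int) (target_score : Int) (die : Int) : Decidable (Pre_compute_quantum_moves_to_winning_universes max_tile target_score die) := by unfold Pre_compute_quantum_moves_to_winning_universes; infer_instance

def pvWitness_compute_quantum_moves_to_winning_universes : Int × Int × Int := (5, 3, 2)

def Spec_compute_quantum_moves_to_winning_universes (max_tile : Int) (target_score : Int) (die : Int) (out : List (List (Int × Int))) : Prop := out = compute_quantum_moves_to_winning_universes_alt max_tile target_score die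
instance (max_tile : Int) (target_score : Int) (die : Int) (out : List (List (Int × Int))) : Decidable (Spec_compute_quantum_moves_to_winning_universes max_tile target_score die out) := by unfold Spec_compute_quantum_moves_to_winning_universes; infer_instance

-- ===== CLAIM (what is proved, stated in full; the proofs are below) =====
def Claim_equal_compute_quantum_moves_to_winning_universes : Prop := ∀ (max_tile : Int) (target_score : Int) (die : Int), Dom_compute_quantum_moves_to_winning_universes max_tile target_score die → Pre_compute_quantum_moves_to_winning_universes max_tile target_score die → Spec_compute_quantum_moves_to_winning_universes max_tile target_score die (compute_quantum_moves_to_winning_universes max_tile target_score die)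

-- ===== LEMMAS AND PROOFS =====

-- the body of B's dist with the recursive call abstracted as `rec` (proof device)
def altStep (mt ts : Int) (qm : PySem.Dict Int Int)
    (rec : Int → Int → PySem.Dict Int Int) (cur_score tile : Int) : PySem.Dict Int Int :=
  (PySem.Dict.items qm).foldl (fun totals mu =>
    let new_tile := PySem.Int.mod (tile + mu.1) mt
    let new_score := cur_score + new_tile + 1
    if ts ≤ new_score then
      PySem.Dict.modify totals 1 0 (· + mu.2)
    else
      (PySem.Dict.items (rec new_score new_tile)).foldl
        (fun totals p => PySem.Dict.modify totals (p.1 + 1) 0 (· + mu.2 * p.2)) totals)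
    PySem.Dict.empty

-- memo-free, fuel-indexed form of the recursion (proof device)
def altDist (mt ts : Int) (qm : PySem.Dict Int Int) : Nat → Int → Int → PySem.Dict Int Int
  | 0 => altStep mt ts qm (fun _ _ => PySem.Dict.empty)
  | n + 1 => altStep mt ts qm (altDist mt ts qm n)

-- pvD s t: the mathematical per-cell distribution (fuel-free view of B's recursion)
def pvD (mt ts : Int) (qm : PySem.Dict Int Int) (s t : Int) : PySem.Dict Int Int :=
  altDist mt ts qm (ts - s).toNat s t

-- A's table lookup and A's per-cell update, abbreviated (definitionally equal to
-- the corresponding inlined pieces of port A).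
def pvLookA (tbl : List (List (Option (PySem.Dict Int Int)))) (s t : Int) : PySem.Dict Int Int :=
  (PySem.List.pyGetD (PySem.List.pyGetD tbl s []) t none).getD PySem.Dict.empty

def pvStepA (mt ts : Int) (qm : PySem.Dict Int Int)
    (tbl : List (List (Option (PySem.Dict Int Int)))) (cs tile : Int) :
    List (List (Option (PySem.Dict Int Int))) :=
  PySem.List.pySetD tbl cs
    (PySem.List.pySetD (PySem.List.pyGetD tbl cs []) tile
      (some (altStep mt ts qm (pvLookA tbl) cs tile)))

lemma pvA_unfold (mt ts die : Int) :
    compute_quantum_moves_to_winning_universes mt ts die =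
      (PySem.List.pyGetD
        ((PySem.List.pyRange (ts - 1) (-1) (-1)).foldl (fun tbl cs =>
          (PySem.List.pyRange 0 mt 1).foldl
            (fun tbl tile => pvStepA mt ts (pvQuantumMoves mt die) tbl cs tile) tbl)
          (List.replicate ts.toNat (List.replicate mt.toNat none))) 0 []).map
        (fun o => (o.getD PySem.Dict.empty).items) := rfl

-- pySetD / pyGetD interaction-- pySetD / pyGetD interaction (nonnegative indices)
lemma pv_pySetD_length {α : Type} (xs : List α) (i : Int) (v : α) :
    (PySem.List.pySetD xs i v).length = xs.length := by
  simp [PySem.List.pySetD, PySem.List.pySet?, PySem.List.pyIdx?]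
  split_ifs <;> simp

lemma pv_pyGetD_pySetD_self {α : Type} (xs : List α) (i : Int) (v d : α)
    (h0 : 0 ≤ i) (h1 : i < (xs.length : Int)) :
    PySem.List.pyGetD (PySem.List.pySetD xs i v) i d = v := by
  simp [PySem.List.pySetD, PySem.List.pySet?, PySem.List.pyIdx?, PySem.List.pyGetD,
    PySem.List.pyGet?, h0, h1]

lemma pv_pyGetD_pySetD_ne {α : Type} (xs : List α) (i j : Int) (v : α) (d : α)
    (h0 : 0 ≤ i) (hj : 0 ≤ j) (hne : i ≠ j) :
    PySem.List.pyGetD (PySem.List.pySetD xs i v) j d = PySem.List.pyGetD xs j d := by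
  simp only [PySem.List.pySetD, PySem.List.pySet?, PySem.List.pyIdx?, PySem.List.pyGetD,
    PySem.List.pyGet?]
  split_ifs with a b c d' e <;> simp_all
  rw [List.getElem_set_ne (by omega)]

lemma altStep_congr (mt ts : Int) (qm : PySem.Dict Int Int)
    (rec rec' : Int → Int → PySem.Dict Int Int) (cs tile : Int) (hmt : 0 < mt)
    (h : ∀ s t, cs < s → s < ts → 0 ≤ t → t < mt → rec s t = rec' s t) :
    altStep mt ts qm rec cs tile = altStep mt ts qm rec' cs tile := by
  unfold altStep
  apply PySem.List.foldl_congr_mem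
  intro acc mu _
  dsimp only
  by_cases hb : ts ≤ cs + PySem.Int.mod (tile + mu.1) mt + 1
  · simp [hb]
  · have hm0 := PySem.Int.mod_nonneg (tile + mu.1) hmt
    have hm1 := PySem.Int.mod_lt (tile + mu.1) hmt
    simp only [if_neg hb]
    rw [h _ _ (by omega) (by omega) hm0 hm1]

lemma altDist_fuel (mt ts : Int) (qm : PySem.Dict Int Int) (hmt : 0 < mt) :
    ∀ (n f g : Nat) (cs tile : Int), ts - cs ≤ (f : Int) → ts - cs ≤ (g : Int) →
      (ts - cs).toNat ≤ n → altDist mt ts qm f cs tile = altDist mt ts qm g cs tile := by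
  intro n
  induction n with
  | zero =>
    intro f g cs tile _ _ hn
    have hts : ts ≤ cs := by omega
    cases f <;> cases g <;>
      exact altStep_congr _ _ _ _ _ _ _ hmt (fun s t h1 h2 _ _ => absurd (h1.trans h2) (by omega))
  | succ n ih =>
    intro f g cs tile hf hg hn
    by_cases hts : ts ≤ cs
    · cases f <;> cases g <;>
        exact altStep_congr _ _ _ _ _ _ _ hmt (fun s t h1 h2 _ _ => absurd (h1.trans h2) (by omega))
    · cases f with
      | zero => omega
      | succ f' =>
        cases g with
        | zero => omega
        | succ g' =>
          show altStep mt ts qm (altDist mt ts qm f') cs tile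
             = altStep mt ts qm (altDist mt ts qm g') cs tile
          apply altStep_congr _ _ _ _ _ _ _ hmt
          intro s t h1 h2 _ _
          exact ih f' g' s t (by omega) (by omega) (by omega)

lemma pvD_fuel (mt ts : Int) (qm : PySem.Dict Int Int) (hmt : 0 < mt) (f : Nat) (cs tile : Int)
    (h : ts - cs ≤ (f : Int)) : altDist mt ts qm f cs tile = pvD mt ts qm cs tile := by
  exact altDist_fuel mt ts qm hmt (max f (ts - cs).toNat) f (ts - cs).toNat cs tile h (by omega) (by omega)

lemma pvD_unfold (mt ts : Int) (qm : PySem.Dict Int Int) (hmt : 0 < mt) (s t : Int) :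
    pvD mt ts qm s t = altStep mt ts qm (pvD mt ts qm) s t := by
  by_cases hts : ts ≤ s
  · have h0 : (ts - s).toNat = 0 := by omega
    unfold pvD
    rw [h0]
    show altStep mt ts qm (fun _ _ => PySem.Dict.empty) s t = _
    exact altStep_congr _ _ _ _ _ _ _ hmt (fun s' t' h1 h2 _ _ => absurd (h1.trans h2) (by omega))
  · obtain ⟨m, hm⟩ : ∃ m, (ts - s).toNat = m + 1 := ⟨(ts - s).toNat - 1, by omega⟩
    unfold pvD
    rw [hm]
    show altStep mt ts qm (altDist mt ts qm m) s t = _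
    apply altStep_congr _ _ _ _ _ _ _ hmt
    intro s' t' h1 h2 _ _
    exact pvD_fuel mt ts qm hmt m s' t' (by omega)

-- ---- B-side: correctness of the worklist loop ----

-- memo invariant: every memoised entry is the corresponding pvD value
def pvGood (mt ts : Int) (qm : PySem.Dict Int Int)
    (m : PySem.Dict (Int × Int) (PySem.Dict Int Int)) : Prop :=
  ∀ k v, PySem.Dict.get? m k = some v → v = pvD mt ts qm k.1 k.2

-- the missing children altExpand collects, as a filterMap
def pvMiss (mt ts : Int)
    (memo : PySem.Dict (Int × Int) (PySem.Dict Int Int)) (cs t : Int)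
    (l : List (Int × Int)) : List (Int × Int) :=
  l.filterMap (fun mu =>
    let new_tile := PySem.Int.mod (t + mu.1) mt
    let new_score := cs + new_tile + 1
    if ts ≤ new_score then none
    else match PySem.Dict.get? memo (new_score, new_tile) with
      | some _ => none
      | none => some (new_score, new_tile))

-- fuel budget: pvF b r bounds the loop iterations needed to resolve a key of
-- rank ≤ r when each expansion can push at most b children
def pvF (b r : Nat) : Nat := (b + 2) ^ (r + 1)

lemma pvExpandAux (mt ts : Int) (qm : PySem.Dict Int Int)
    (memo : PySem.Dict (Int × Int) (PySem.Dict Int Int)) (cs t : Int)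
    (hG : pvGood mt ts qm memo) :
    ∀ (l : List (Int × Int)) (ms : List (Int × Int)) (tot : PySem.Dict Int Int),
      (l.foldl (fun st mu =>
        let new_tile := PySem.Int.mod (t + mu.1) mt
        let new_score := cs + new_tile + 1
        if ts ≤ new_score then
          (st.1, PySem.Dict.modify st.2 1 0 (· + mu.2))
        else
          match PySem.Dict.get? memo (new_score, new_tile) with
          | none => (st.1 ++ [(new_score, new_tile)], st.2)
          | some sub =>
            (st.1, (PySem.Dict.items sub).foldl
              (fun totals p => PySem.Dict.modify totals (p.1 + 1) 0 (· + mu.2 * p.2)) st.2))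
        (ms, tot)).1 = ms ++ pvMiss mt ts memo cs t l ∧
      (pvMiss mt ts memo cs t l = [] →
        (l.foldl (fun st mu =>
          let new_tile := PySem.Int.mod (t + mu.1) mt
          let new_score := cs + new_tile + 1
          if ts ≤ new_score then
            (st.1, PySem.Dict.modify st.2 1 0 (· + mu.2))
          else
            match PySem.Dict.get? memo (new_score, new_tile) with
            | none => (st.1 ++ [(new_score, new_tile)], st.2)
            | some sub =>
              (st.1, (PySem.Dict.items sub).foldl
                (fun totals p => PySem.Dict.modify totals (p.1 + 1) 0 (· + mu.2 * p.2)) st.2))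
          (ms, tot)).2 =
        l.foldl (fun totals mu =>
          let new_tile := PySem.Int.mod (t + mu.1) mt
          let new_score := cs + new_tile + 1
          if ts ≤ new_score then
            PySem.Dict.modify totals 1 0 (· + mu.2)
          else
            (PySem.Dict.items (pvD mt ts qm new_score new_tile)).foldl
              (fun totals p => PySem.Dict.modify totals (p.1 + 1) 0 (· + mu.2 * p.2)) totals)
          tot) := by
  intro l
  induction l with
  | nil => intro ms tot; exact ⟨by simp [pvMiss], fun _ => rfl⟩
  | cons a l ihl =>
    intro ms tot
    simp only [List.foldl_cons]
    by_cases hb : ts ≤ cs + PySem.Int.mod (t + a.1) mt + 1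
    · have hm : pvMiss mt ts memo cs t (a :: l) = pvMiss mt ts memo cs t l := by
        simp [pvMiss, List.filterMap_cons, hb]
      simp only [if_pos hb]
      refine ⟨by rw [(ihl ms _).1, hm], fun h0 => ?_⟩
      rw [hm] at h0
      exact (ihl ms _).2 h0
    · simp only [if_neg hb]
      cases hget : PySem.Dict.get? memo
          (cs + PySem.Int.mod (t + a.1) mt + 1, PySem.Int.mod (t + a.1) mt) with
      | some sub =>
        have hm : pvMiss mt ts memo cs t (a :: l) = pvMiss mt ts memo cs t l := by
          simp [pvMiss, List.filterMap_cons, hb, hget]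
        simp only [hget]
        refine ⟨by rw [(ihl ms _).1, hm], fun h0 => ?_⟩
        rw [hm] at h0
        rw [(ihl ms _).2 h0,
          hG (cs + PySem.Int.mod (t + a.1) mt + 1, PySem.Int.mod (t + a.1) mt) sub hget]
      | none =>
        have hm : pvMiss mt ts memo cs t (a :: l) =
            (cs + PySem.Int.mod (t + a.1) mt + 1, PySem.Int.mod (t + a.1) mt) ::
              pvMiss mt ts memo cs t l := by
          simp [pvMiss, List.filterMap_cons, hb, hget]
        simp only [hget]
        refine ⟨by rw [(ihl _ _).1, hm]; simp, fun h0 => ?_⟩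
        rw [hm] at h0
        exact absurd h0 (by simp)
  
lemma pvExpand_fst (mt ts : Int) (qm : PySem.Dict Int Int)
    (memo : PySem.Dict (Int × Int) (PySem.Dict Int Int)) (cs t : Int)
    (hG : pvGood mt ts qm memo) :
    (altExpand mt ts qm memo cs t).1 = pvMiss mt ts memo cs t (PySem.Dict.items qm) := by
  have h := (pvExpandAux mt ts qm memo cs t hG (PySem.Dict.items qm) [] PySem.Dict.empty).1
  simpa [altExpand] using h

lemma pvExpand_snd (mt ts : Int) (qm : PySem.Dict Int Int)
    (memo : PySem.Dict (Int × Int) (PySem.Dict Int Int)) (cs t : Int) (hmt : 0 < mt)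
    (hG : pvGood mt ts qm memo)
    (h0 : pvMiss mt ts memo cs t (PySem.Dict.items qm) = []) :
    (altExpand mt ts qm memo cs t).2 = pvD mt ts qm cs t := by
  have h := (pvExpandAux mt ts qm memo cs t hG (PySem.Dict.items qm) [] PySem.Dict.empty).2 h0
  rw [pvD_unfold mt ts qm hmt cs t]
  exact h

lemma pvMiss_mem (mt ts : Int)
    (memo : PySem.Dict (Int × Int) (PySem.Dict Int Int)) (cs t : Int)
    (l : List (Int × Int)) (hmt : 0 < mt) (c : Int × Int)
    (hc : c ∈ pvMiss mt ts memo cs t l) :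
    cs + 1 ≤ c.1 ∧ c.1 < ts ∧ PySem.Dict.get? memo c = none := by
  rw [pvMiss, List.mem_filterMap] at hc
  obtain ⟨mu, _, hmu⟩ := hc
  simp only at hmu
  by_cases hb : ts ≤ cs + PySem.Int.mod (t + mu.1) mt + 1
  · rw [if_pos hb] at hmu
    cases hmu
  · rw [if_neg hb] at hmu
    cases hget : PySem.Dict.get? memo
        (cs + PySem.Int.mod (t + mu.1) mt + 1, PySem.Int.mod (t + mu.1) mt) with
    | some sub => rw [hget] at hmu; cases hmu
    | none =>
      rw [hget] at hmu
      cases hmu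
      have := PySem.Int.mod_nonneg (t + mu.1) hmt
      exact ⟨by omega, by omega, hget⟩

lemma pvMiss_length_le (mt ts : Int)
    (memo : PySem.Dict (Int × Int) (PySem.Dict Int Int)) (cs t : Int)
    (l : List (Int × Int)) :
    (pvMiss mt ts memo cs t l).length ≤ l.length := by
  exact (List.length_filterMap_le _ _)

lemma altLoop_nil (mt ts : Int) (qm : PySem.Dict Int Int) (f : Nat)
    (m : PySem.Dict (Int × Int) (PySem.Dict Int Int)) :
    altLoop mt ts qm f [] m = m := by
  cases f <;> rfl

lemma pvF_ge_two (b r : Nat) : 2 ≤ pvF b r := by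
  calc 2 ≤ b + 2 := by omega
  _ = (b + 2) ^ 1 := (pow_one _).symm
  _ ≤ (b + 2) ^ (r + 1) := Nat.pow_le_pow_right (by omega) (by omega)

lemma pvF_step (b r : Nat) : b * pvF b r + 2 ≤ pvF b (r + 1) := by
  have h2 : 2 ≤ pvF b r := pvF_ge_two b r
  have hmul : (b + 2) * pvF b r = b * pvF b r + 2 * pvF b r := by ring
  have heq : pvF b (r + 1) = (b + 2) * pvF b r := by rw [pvF, pvF, ← pow_succ']
  omega
  
lemma pvResolve (mt ts : Int) (qm : PySem.Dict Int Int) (hmt : 0 < mt) :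
    ∀ (r : Nat) (key : Int × Int) (fuel : Nat) (rest : List (Int × Int))
      (memo : PySem.Dict (Int × Int) (PySem.Dict Int Int)),
      pvGood mt ts qm memo → (ts - key.1).toNat ≤ r →
      pvF (PySem.Dict.items qm).length r ≤ fuel →
      ∃ (fuel' : Nat) (memo' : PySem.Dict (Int × Int) (PySem.Dict Int Int)),
        altLoop mt ts qm fuel (key :: rest) memo = altLoop mt ts qm fuel' rest memo' ∧
        pvGood mt ts qm memo' ∧
        (∀ k v, PySem.Dict.get? memo k = some v → PySem.Dict.get? memo' k = some v) ∧
        PySem.Dict.get? memo' key = some (pvD mt ts qm key.1 key.2) ∧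
        fuel - pvF (PySem.Dict.items qm).length r ≤ fuel' ∧
        (∀ k, PySem.Dict.get? memo' k ≠ PySem.Dict.get? memo k → k = key ∨ key.1 < k.1) := by
  intro r
  induction r using Nat.strong_induction_on with
  | _ r ih =>
    intro key fuel rest memo hG hrank hfuel
    set b := (PySem.Dict.items qm).length with hb
    obtain ⟨f, rfl⟩ : ∃ f, fuel = f + 1 :=
      ⟨fuel - 1, by have := pvF_ge_two b r; omega⟩
    cases hk : PySem.Dict.get? memo key with
    | some v =>
      refine ⟨f, memo, ?_, hG, fun _ _ h => h, ?_, ?_, fun k h => absurd rfl h⟩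
      · simp only [altLoop, hk]
      · rw [hk, hG key v hk]
      · have := pvF_ge_two b r; omega
    | none =>
      have hfst := pvExpand_fst mt ts qm memo key.1 key.2 hG
      by_cases hmiss : pvMiss mt ts memo key.1 key.2 (PySem.Dict.items qm) = []
      · -- ready on first visit
        have hsnd := pvExpand_snd mt ts qm memo key.1 key.2 hmt hG hmiss
        have hstep : altLoop mt ts qm (f + 1) (key :: rest) memo =
            altLoop mt ts qm f rest
              (PySem.Dict.insert memo key (altExpand mt ts qm memo key.1 key.2).2) := by
          simp only [altLoop, hk, hfst, hmiss]
          simp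
        refine ⟨f, _, hstep, ?_, ?_, ?_, ?_, ?_⟩
        · intro k v hkv
          rw [PySem.Dict.get?_insert] at hkv
          by_cases hke : k = key
          · rw [if_pos hke] at hkv
            cases hkv
            rw [hke, hsnd]
          · rw [if_neg hke] at hkv
            exact hG k v hkv
        · intro k v hkv
          rw [PySem.Dict.get?_insert]
          by_cases hke : k = key
          · rw [hke, hk] at hkv; cases hkv
          · rw [if_neg hke]; exact hkv
        · rw [PySem.Dict.get?_insert, if_pos rfl, hsnd]
        · have := pvF_ge_two b r; omega
        · intro k hne
          by_cases hke : k = key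
          · exact Or.inl hke
          · rw [PySem.Dict.get?_insert, if_neg hke] at hne
            exact absurd rfl hne
      · -- some children missing: push them, resolve them, revisit
        set miss := pvMiss mt ts memo key.1 key.2 (PySem.Dict.items qm) with hm
        have hchild : ∀ c ∈ miss, key.1 + 1 ≤ c.1 ∧ c.1 < ts ∧ PySem.Dict.get? memo c = none :=
          fun c hc => pvMiss_mem mt ts memo key.1 key.2 (PySem.Dict.items qm) hmt c hc
        obtain ⟨c0, hc0⟩ : ∃ c, c ∈ miss := by
          cases hml : miss with
          | nil => exact absurd hml hmiss
          | cons x xs => exact ⟨x, List.mem_cons_self⟩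
        have hr2 : 2 ≤ (ts - key.1).toNat := by
          have := (hchild c0 hc0).1
          have := (hchild c0 hc0).2.1
          omega
        obtain ⟨r', rfl⟩ : ∃ r', r = r' + 1 := ⟨r - 1, by omega⟩
        have hstep : altLoop mt ts qm (f + 1) (key :: rest) memo =
            altLoop mt ts qm f (miss.reverse ++ key :: rest) memo := by
          simp only [altLoop, hk, hfst, ← hm]
          simp [hmiss]
        -- resolve a list of keys of rank ≤ r'
        have hlist : ∀ (ks : List (Int × Int)) (fl : Nat) (rs : List (Int × Int))
            (m : PySem.Dict (Int × Int) (PySem.Dict Int Int)),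
            pvGood mt ts qm m → (∀ k ∈ ks, (ts - k.1).toNat ≤ r') →
            ks.length * pvF b r' ≤ fl →
            ∃ (fl' : Nat) (m' : PySem.Dict (Int × Int) (PySem.Dict Int Int)),
              altLoop mt ts qm fl (ks ++ rs) m = altLoop mt ts qm fl' rs m' ∧
              pvGood mt ts qm m' ∧
              (∀ k v, PySem.Dict.get? m k = some v → PySem.Dict.get? m' k = some v) ∧
              (∀ k ∈ ks, PySem.Dict.get? m' k = some (pvD mt ts qm k.1 k.2)) ∧
              fl - ks.length * pvF b r' ≤ fl' ∧
              (∀ k, PySem.Dict.get? m' k ≠ PySem.Dict.get? m k →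
                ∃ k0 ∈ ks, k = k0 ∨ k0.1 < k.1) := by
          intro ks
          induction ks with
          | nil =>
            intro fl rs m hGm _ _
            exact ⟨fl, m, rfl, hGm, fun _ _ h => h, fun k hk0 => absurd hk0 (List.not_mem_nil),
              by simpa using Nat.sub_le fl 0, fun k h => absurd rfl h⟩
          | cons a ks ihk =>
            intro fl rs m hGm hks hfl
            obtain ⟨f1, m1, heq1, hG1, hpres1, hget1, hf1, hch1⟩ :=
              ih r' (by omega) a fl (ks ++ rs) m hGm (hks a List.mem_cons_self)
                (by
                  have : pvF b r' ≤ fl := le_trans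
                    (Nat.le_mul_of_pos_left _ (by simp)) hfl
                  exact this)
            obtain ⟨f2, m2, heq2, hG2, hpres2, hget2, hf2, hch2⟩ :=
              ihk f1 rs m1 hG1 (fun k hk0 => hks k (List.mem_cons_of_mem _ hk0))
                (by
                  have hd : (ks.length + 1) * pvF b r' =
                      ks.length * pvF b r' + pvF b r' := by ring
                  simp only [List.length_cons] at hfl
                  omega)
            refine ⟨f2, m2, ?_, hG2, fun k v h => hpres2 k v (hpres1 k v h), ?_, ?_, ?_⟩
            · rw [List.cons_append, heq1, heq2]
            · intro k hk0
              rcases List.mem_cons.mp hk0 with hka | hkks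
              · subst hka
                exact hpres2 k _ hget1
              · exact hget2 k hkks
            · have hd : (ks.length + 1) * pvF b r' =
                  ks.length * pvF b r' + pvF b r' := by ring
              simp only [List.length_cons] at *
              omega
            · intro k hne
              by_cases hmid : PySem.Dict.get? m1 k = PySem.Dict.get? m k
              · rw [← hmid] at hne
                obtain ⟨k0, hk0, hor⟩ := hch2 k hne
                exact ⟨k0, List.mem_cons_of_mem _ hk0, hor⟩
              · rcases hch1 k hmid with hka | hlt
                · exact ⟨a, List.mem_cons_self, Or.inl hka⟩
                · exact ⟨a, List.mem_cons_self, Or.inr hlt⟩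
        have hranks : ∀ k ∈ miss.reverse, (ts - k.1).toNat ≤ r' := by
          intro k hk0
          rw [List.mem_reverse] at hk0
          have h1 := (hchild k hk0).1
          have h2 := (hchild k hk0).2.1
          omega
        have hflen : miss.reverse.length * pvF b r' ≤ f := by
          have hlen : miss.length ≤ b := pvMiss_length_le mt ts memo key.1 key.2 _
          have := pvF_step b r'
          have hlen2 : miss.reverse.length = miss.length := List.length_reverse
          calc miss.reverse.length * pvF b r' ≤ b * pvF b r' := by
                rw [hlen2]; exact Nat.mul_le_mul_right _ hlen
          _ ≤ f := by
                have h3 : pvF b (r' + 1) ≤ f + 1 := hfuel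
                omega
        obtain ⟨f1, m1, heq1, hG1, hpres1, hget1, hf1, hch1⟩ :=
          hlist miss.reverse f (key :: rest) memo hG hranks hflen
        -- key is still unmemoised in m1
        have hk1 : PySem.Dict.get? m1 key = none := by
          cases hk1 : PySem.Dict.get? m1 key with
          | none => rfl
          | some v =>
            have hne : PySem.Dict.get? m1 key ≠ PySem.Dict.get? memo key := by
              rw [hk1, hk]; exact fun h => by cases h
            obtain ⟨k0, hk0, hor⟩ := hch1 key hne
            rw [List.mem_reverse] at hk0
            have h1 := (hchild k0 hk0).1
            rcases hor with hkk | hlt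
            · rw [hkk] at h1; omega
            · omega
        -- on the revisit every child is memoised
        have hmiss1 : pvMiss mt ts m1 key.1 key.2 (PySem.Dict.items qm) = [] := by
          cases hml : pvMiss mt ts m1 key.1 key.2 (PySem.Dict.items qm) with
          | nil => rfl
          | cons c cs' =>
            have hc : c ∈ pvMiss mt ts m1 key.1 key.2 (PySem.Dict.items qm) := by
              rw [hml]; exact List.mem_cons_self
            have hcm := pvMiss_mem mt ts m1 key.1 key.2 _ hmt c hc
            -- c is a child of key, so it was either present in memo or in miss
            have hcmemo : c ∈ miss ∨ (∃ v, PySem.Dict.get? memo c = some v) := by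
              by_cases hcm0 : PySem.Dict.get? memo c = none
              · left
                -- c missing from memo: it appears in miss (same filterMap over memo)
                rw [hm, pvMiss, List.mem_filterMap]
                rw [pvMiss, List.mem_filterMap] at hc
                obtain ⟨mu, hmu, hfm⟩ := hc
                refine ⟨mu, hmu, ?_⟩
                simp only at hfm ⊢
                by_cases hb2 : ts ≤ key.1 + PySem.Int.mod (key.2 + mu.1) mt + 1
                · rw [if_pos hb2] at hfm; cases hfm
                · rw [if_neg hb2] at hfm ⊢
                  cases hg1 : PySem.Dict.get? m1
                      (key.1 + PySem.Int.mod (key.2 + mu.1) mt + 1,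
                        PySem.Int.mod (key.2 + mu.1) mt) with
                  | some sub => rw [hg1] at hfm; cases hfm
                  | none =>
                    rw [hg1] at hfm
                    cases hfm
                    rw [hcm0]
              · right
                cases hv : PySem.Dict.get? memo c with
                | none => exact absurd hv hcm0
                | some v => exact ⟨v, rfl⟩
            rcases hcmemo with hcmiss | ⟨v, hv⟩
            · have := hget1 c (by rw [List.mem_reverse]; exact hcmiss)
              rw [hcm.2.2] at this
              cases this
            · have := hpres1 c v hv
              rw [hcm.2.2] at this
              cases this
        -- one more step resolves key
        obtain ⟨f2, rfl⟩ : ∃ f2, f1 = f2 + 1 := by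
          refine ⟨f1 - 1, ?_⟩
          have hlen : miss.length ≤ b := pvMiss_length_le mt ts memo key.1 key.2 _
          have hmm := Nat.mul_le_mul_right (pvF b r') hlen
          have hs := pvF_step b r'
          have h3 : pvF b (r' + 1) ≤ f + 1 := hfuel
          have hlen2 : miss.reverse.length * pvF b r' = miss.length * pvF b r' := by
            rw [List.length_reverse]
          omega
        have hfst1 := pvExpand_fst mt ts qm m1 key.1 key.2 hG1
        have hsnd1 := pvExpand_snd mt ts qm m1 key.1 key.2 hmt hG1 hmiss1
        have hstep2 : altLoop mt ts qm (f2 + 1) (key :: rest) m1 =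
            altLoop mt ts qm f2 rest
              (PySem.Dict.insert m1 key (altExpand mt ts qm m1 key.1 key.2).2) := by
          simp only [altLoop, hk1, hfst1, hmiss1]
          simp
        refine ⟨f2, PySem.Dict.insert m1 key (altExpand mt ts qm m1 key.1 key.2).2,
          ?_, ?_, ?_, ?_, ?_, ?_⟩
        · rw [hstep, heq1, hstep2]
        · intro k v hkv
          rw [PySem.Dict.get?_insert] at hkv
          by_cases hke : k = key
          · rw [if_pos hke] at hkv
            cases hkv
            rw [hke, hsnd1]
          · rw [if_neg hke] at hkv
            exact hG1 k v hkv
        · intro k v hkv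
          rw [PySem.Dict.get?_insert]
          by_cases hke : k = key
          · rw [hke, hk] at hkv; cases hkv
          · rw [if_neg hke]
            exact hpres1 k v hkv
        · rw [PySem.Dict.get?_insert, if_pos rfl, hsnd1]
        · have hlen : miss.length ≤ b := pvMiss_length_le mt ts memo key.1 key.2 _
          have hmm := Nat.mul_le_mul_right (pvF b r') hlen
          have hs := pvF_step b r'
          have hlen2 : miss.reverse.length * pvF b r' = miss.length * pvF b r' := by
            rw [List.length_reverse]
          omega
        · intro k hne
          by_cases hke : k = key
          · exact Or.inl hke
          · rw [PySem.Dict.get?_insert, if_neg hke] at hne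
            by_cases hmid : PySem.Dict.get? m1 k = PySem.Dict.get? memo k
            · rw [hmid] at hne
              exact absurd rfl hne
            · obtain ⟨k0, hk0, hor⟩ := hch1 k hmid
              rw [List.mem_reverse] at hk0
              have h1 := (hchild k0 hk0).1
              right
              rcases hor with hkk | hlt
              · rw [hkk]; omega
              · omega

lemma pvB_eq (mt ts die : Int) (hmt : 0 < mt) (hts : 1 ≤ ts) :
    compute_quantum_moves_to_winning_universes_alt mt ts die =
      (PySem.List.pyRange 0 mt 1).map
        (fun tile => (pvD mt ts (pvQuantumMoves mt die) 0 tile).items) := by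
  have key : ∀ (l : List Int) (m : PySem.Dict (Int × Int) (PySem.Dict Int Int))
      (acc : List (List (Int × Int))), pvGood mt ts (pvQuantumMoves mt die) m →
      (l.foldl (fun st tile =>
        let memo := altLoop mt ts (pvQuantumMoves mt die)
          ((PySem.Dict.size (pvQuantumMoves mt die) + 2) ^ (ts.toNat + 2)) [(0, tile)] st.1
        (memo, st.2 ++
          [((PySem.Dict.get? memo (0, tile)).getD PySem.Dict.empty).items])) (m, acc)).2 =
      acc ++ l.map (fun tile => (pvD mt ts (pvQuantumMoves mt die) 0 tile).items) := by
    intro l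
    induction l with
    | nil => intro m acc _; simp
    | cons a l ihl =>
      intro m acc hGm
      simp only [List.foldl_cons, List.map_cons]
      obtain ⟨f1, m1, heq1, hG1, _, hget1, _, _⟩ :=
        pvResolve mt ts (pvQuantumMoves mt die) hmt ts.toNat (0, a)
          ((PySem.Dict.size (pvQuantumMoves mt die) + 2) ^ (ts.toNat + 2)) [] m hGm
          (by simp)
          (by
            show pvF (PySem.Dict.items (pvQuantumMoves mt die)).length ts.toNat ≤ _
            have : (PySem.Dict.items (pvQuantumMoves mt die)).length =
                PySem.Dict.size (pvQuantumMoves mt die) := rfl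
            rw [this, pvF]
            exact Nat.pow_le_pow_right (by omega) (by omega))
      rw [heq1, altLoop_nil] at *
      rw [ihl _ _ hG1, hget1]
      simp
  show ((PySem.List.pyRange 0 mt 1).foldl _ (PySem.Dict.empty, [])).2 = _
  rw [key (PySem.List.pyRange 0 mt 1) PySem.Dict.empty []
    (fun k v h => by simp [PySem.Dict.get?_empty] at h)]
  simp

-- invariant for A's table: rows with index ≥ k hold the pvD values
def pvPA (mt ts : Int) (qm : PySem.Dict Int Int) (k : Int)
    (tbl : List (List (Option (PySem.Dict Int Int)))) : Prop :=
  tbl.length = ts.toNat ∧ ∀ s : Int, 0 ≤ s → s < ts →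
    (PySem.List.pyGetD tbl s []).length = mt.toNat ∧
    (k ≤ s → ∀ t : Int, 0 ≤ t → t < mt →
      PySem.List.pyGetD (PySem.List.pyGetD tbl s []) t none = some (pvD mt ts qm s t))

lemma pvPA_init (mt ts : Int) (qm : PySem.Dict Int Int) :
    pvPA mt ts qm ts (List.replicate ts.toNat (List.replicate mt.toNat none)) := by
  refine ⟨by simp, fun s hs0 hs1 => ?_⟩
  have hrow : PySem.List.pyGetD (List.replicate ts.toNat (List.replicate mt.toNat
      (none : Option (PySem.Dict Int Int)))) s [] = List.replicate mt.toNat none := by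
    rw [PySem.List.pyGetD_eq_getElem _ _ hs0 (by simp; omega)]
    exact List.getElem_replicate _
  rw [hrow]
  exact ⟨by simp, fun hts => absurd (hts.trans_lt hs1) (by omega)⟩

lemma pvA_row_step (mt ts : Int) (qm : PySem.Dict Int Int) (hmt : 0 < mt) (k : Int)
    (hk0 : 0 ≤ k) (hk1 : k < ts) (tbl : List (List (Option (PySem.Dict Int Int))))
    (hP : pvPA mt ts qm (k + 1) tbl) :
    pvPA mt ts qm k
      ((PySem.List.pyRange 0 mt 1).foldl (fun tbl tile => pvStepA mt ts qm tbl k tile) tbl) := by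
  rw [PySem.List.pyRange_one, List.foldl_map]
  have key : ∀ j : Nat, j ≤ mt.toNat →
      ((List.range j).foldl (fun tbl (i : Nat) => pvStepA mt ts qm tbl k (0 + (i : Int))) tbl).length = tbl.length ∧
      (∀ s : Int, 0 ≤ s → s ≠ k →
        PySem.List.pyGetD ((List.range j).foldl (fun tbl (i : Nat) => pvStepA mt ts qm tbl k (0 + (i : Int))) tbl) s [] =
        PySem.List.pyGetD tbl s []) ∧
      (PySem.List.pyGetD ((List.range j).foldl (fun tbl (i : Nat) => pvStepA mt ts qm tbl k (0 + (i : Int))) tbl) k []).length = mt.toNat ∧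
      (∀ t : Int, 0 ≤ t → t < (j : Int) →
        PySem.List.pyGetD (PySem.List.pyGetD ((List.range j).foldl (fun tbl (i : Nat) => pvStepA mt ts qm tbl k (0 + (i : Int))) tbl) k []) t none =
        some (pvD mt ts qm k t)) := by
    intro j
    induction j with
    | zero =>
      intro _
      refine ⟨rfl, fun _ _ _ => rfl, (hP.2 k hk0 hk1).1, fun t _ ht => absurd ht (by omega)⟩
    | succ j ih =>
      intro hj
      obtain ⟨hl, hrows, hrlen, hent⟩ := ih (by omega)
      rw [List.range_succ, List.foldl_append, List.foldl_cons, List.foldl_nil]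
      set tbl' := (List.range j).foldl (fun tbl (i : Nat) => pvStepA mt ts qm tbl k (0 + (i : Int))) tbl with htbl'
      have hklen : k < (tbl'.length : Int) := by rw [hl, hP.1]; omega
      have htotals : altStep mt ts qm (pvLookA tbl') k (0 + (j : Int)) =
          pvD mt ts qm k (0 + (j : Int)) := by
        rw [pvD_unfold mt ts qm hmt]
        apply altStep_congr _ _ _ _ _ _ _ hmt
        intro s t hs1 hs2 ht0 ht1
        unfold pvLookA
        rw [hrows s (by omega) (by omega), (hP.2 s (by omega) hs2).2 (by omega) t ht0 ht1]
        rfl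
      refine ⟨?_, ?_, ?_, ?_⟩
      · show (pvStepA mt ts qm tbl' k (0 + (j : Int))).length = tbl.length
        unfold pvStepA
        rw [pv_pySetD_length, hl]
      · intro s hs0 hsk
        show PySem.List.pyGetD (pvStepA mt ts qm tbl' k (0 + (j : Int))) s [] = _
        unfold pvStepA
        rw [pv_pyGetD_pySetD_ne _ k s _ _ hk0 hs0 (fun h => hsk h.symm)]
        exact hrows s hs0 hsk
      · show (PySem.List.pyGetD (pvStepA mt ts qm tbl' k (0 + (j : Int))) k []).length = mt.toNat
        unfold pvStepA
        rw [pv_pyGetD_pySetD_self _ k _ _ hk0 hklen, pv_pySetD_length, hrlen]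
      · intro t ht0 htj
        show PySem.List.pyGetD (PySem.List.pyGetD (pvStepA mt ts qm tbl' k (0 + (j : Int))) k []) t none = _
        unfold pvStepA
        rw [pv_pyGetD_pySetD_self _ k _ _ hk0 hklen]
        by_cases hte : t = 0 + (j : Int)
        · rw [hte, pv_pyGetD_pySetD_self _ _ _ _ (by omega) (by rw [hrlen]; omega), htotals]
        · rw [pv_pyGetD_pySetD_ne _ (0 + (j : Int)) t _ _ (by omega) ht0 (fun h => hte h.symm)]
          exact hent t ht0 (by omega)
  obtain ⟨hl, hrows, hrlen, hent⟩ := key (mt - 0).toNat (by omega)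
  refine ⟨by rw [hl, hP.1], fun s hs0 hs1 => ?_⟩
  by_cases hsk : s = k
  · subst hsk
    refine ⟨by rw [hrlen], fun _ t ht0 ht1 => hent t ht0 (by omega)⟩
  · rw [hrows s hs0 hsk]
    exact ⟨(hP.2 s hs0 hs1).1, fun hks t ht0 ht1 => (hP.2 s hs0 hs1).2 (by omega) t ht0 ht1⟩

lemma pvA_table (mt ts : Int) (qm : PySem.Dict Int Int) (hmt : 0 < mt) :
    ∀ (n : Nat) (a : Int) (tbl : List (List (Option (PySem.Dict Int Int)))),
      (a + 1).toNat ≤ n → -1 ≤ a → a < ts → pvPA mt ts qm (a + 1) tbl →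
      pvPA mt ts qm 0
        ((PySem.List.pyRange a (-1) (-1)).foldl (fun tbl cs =>
          (PySem.List.pyRange 0 mt 1).foldl (fun tbl tile => pvStepA mt ts qm tbl cs tile) tbl)
          tbl) := by
  intro n
  induction n with
  | zero =>
    intro a tbl hn ha0 ha1 hP
    have ha : a = -1 := by omega
    subst ha
    rw [PySem.List.pyRange_neg_one_eq_nil (by omega)]
    simpa using hP
  | succ n ih =>
    intro a tbl hn ha0 ha1 hP
    by_cases ha : a ≤ -1
    · have ha' : a = -1 := by omega
      subst ha'
      rw [PySem.List.pyRange_neg_one_eq_nil (by omega)]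
      simpa using hP
    · rw [PySem.List.pyRange_neg_one_cons (by omega : (-1 : Int) < a), List.foldl_cons]
      have h1 := pvA_row_step mt ts qm hmt a (by omega) ha1 tbl hP
      have h2 := ih (a - 1)
        ((PySem.List.pyRange 0 mt 1).foldl (fun tbl tile => pvStepA mt ts qm tbl a tile) tbl)
        (by omega) (by omega) (by omega) (by rw [show a - 1 + 1 = a by ring]; exact h1)
      exact h2

lemma pv_final (mt ts : Int) (qm : PySem.Dict Int Int) (hmt : 0 < mt) (hts : 1 ≤ ts)
    (tbl : List (List (Option (PySem.Dict Int Int))))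
    (hA : pvPA mt ts qm 0 tbl) :
    (PySem.List.pyGetD tbl 0 []).map (fun o => (o.getD PySem.Dict.empty).items) =
      (PySem.List.pyRange 0 mt 1).map (fun tile => (pvD mt ts qm 0 tile).items) := by
  obtain ⟨hlenA, hrowsA⟩ := hA
  obtain ⟨hlen0, hent0⟩ := hrowsA 0 le_rfl (by omega)
  apply List.ext_getElem
  · simp only [List.length_map, PySem.List.length_pyRange_one]
    rw [hlen0]
    omega
  · intro i h1 h2
    rw [List.length_map, hlen0] at h1
    simp only [List.getElem_map]
    have he := hent0 le_rfl (i : Int) (by omega) (by omega)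
    rw [PySem.List.pyGetD_natCast, List.getD_eq_getElem?_getD,
      List.getElem?_eq_getElem (by omega), Option.getD_some] at he
    rw [he, PySem.List.getElem_pyRange_one]
    simp

theorem pv_main (mt ts die : Int)
    (hpre : Pre_compute_quantum_moves_to_winning_universes mt ts die) :
    compute_quantum_moves_to_winning_universes mt ts die =
      compute_quantum_moves_to_winning_universes_alt mt ts die := by
  obtain ⟨hts, _⟩ := hpre
  by_cases hmt : 0 < mt
  · rw [pvA_unfold, pvB_eq mt ts die hmt hts]
    refine pv_final mt ts (pvQuantumMoves mt die) hmt hts _ ?_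
    exact pvA_table mt ts (pvQuantumMoves mt die) hmt ts.toNat (ts - 1)
      (List.replicate ts.toNat (List.replicate mt.toNat none))
      (by omega) (by omega) (by omega)
      (by rw [show ts - 1 + 1 = ts by ring]; exact pvPA_init mt ts (pvQuantumMoves mt die))
  · have hmt' : mt ≤ 0 := by omega
    rw [pvA_unfold]
    show _ = ((PySem.List.pyRange 0 mt 1).foldl _ (PySem.Dict.empty, [])).2
    rw [PySem.List.pyRange_one_eq_nil hmt']
    simp only [List.foldl_nil]
    rw [PySem.List.foldl_ignore]
    rw [show mt.toNat = 0 by omega]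
    have h1 : PySem.List.pyGetD
        (List.replicate ts.toNat (List.replicate 0 (none : Option (PySem.Dict Int Int)))) 0 [] = [] := by
      rw [PySem.List.pyGetD_eq_getElem _ _ le_rfl (by simp; omega)]
      simp
    rw [h1]
    rfl

-- ===== VERDICT (by name: the statement is the Claim_ definition above) =====
theorem compute_quantum_moves_to_winning_universes_spec : Claim_equal_compute_quantum_moves_to_winning_universes := by
  intro mt ts die _ hpre
  exact pv_main mt ts die hpre
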